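-- pv_equiv track=rewrite | github.com/einnerin/kartonki | scripts/validate/validate_no_cognates.py | find_cognate
-- ===== SOURCE A (Python) =====
-- def find_cognate(text, terms):
--     """Return list of (term_label, matched_fragment) for any stems found in text."""
--     if not text:
--         return []
--     low = text.lower()
--     hits = []
--     for label, stems in terms:
--         for s in stems:
--             if s in low:
--                 hits.append((label, s))
--     return hits
-- ===== SOURCE B (Python) =====
-- def find_cognate(text, terms):
--     """Return list of (term_label, matched_fragment) for any stems found in text."""
--     if not text:
--         return []
--     low = text.lower()
--     lens = {len(s) for _label, stems in terms for s in stems}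
--     subs = {low[i:i + l] for l in lens for i in range(len(low) - l + 1)}
--     return [(label, s) for label, stems in terms for s in stems if s in subs]
-- ===== Notes on version B (the rewrite author's own statement) =====
-- stated objective: faster
-- what changed: Instead of running a substring search over the whole text for every stem, B builds once a set of all substrings of the lowered text whose length is a stem length, and then emits each stem by a single hash-set membership test.
import Mathlib
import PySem

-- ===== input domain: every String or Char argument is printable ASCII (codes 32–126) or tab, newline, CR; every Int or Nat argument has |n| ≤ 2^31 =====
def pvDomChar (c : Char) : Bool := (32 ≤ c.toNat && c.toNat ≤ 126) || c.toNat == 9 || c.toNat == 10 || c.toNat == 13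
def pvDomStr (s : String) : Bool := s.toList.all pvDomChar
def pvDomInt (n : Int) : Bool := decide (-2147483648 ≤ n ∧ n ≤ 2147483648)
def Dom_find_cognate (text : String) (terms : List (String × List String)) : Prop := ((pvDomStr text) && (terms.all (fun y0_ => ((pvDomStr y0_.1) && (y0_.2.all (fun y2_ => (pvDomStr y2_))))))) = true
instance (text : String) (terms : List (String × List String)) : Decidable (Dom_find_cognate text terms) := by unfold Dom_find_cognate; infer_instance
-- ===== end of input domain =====

-- B replaces the per-stem substring searches over the text by a set of all substrings of the
-- lowered text with a stem length, built once, followed by per-stem set-membership tests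
-- (measured faster in a timing run on the generated inputs).

-- ===== PORT A =====
def find_cognate (text : String) (terms : List (String × List String)) : List (String × String) :=
  if text = "" then []
  else
    let low := PySem.Str.lower text
    terms.foldl (fun hits lt =>
      lt.2.foldl (fun hits s =>
        if PySem.Str.isIn s low then hits ++ [(lt.1, s)] else hits) hits) []

-- ===== PORT B =====
def find_cognate_alt (text : String) (terms : List (String × List String)) : List (String × String) :=
  if text = "" then []
  else
    let low := PySem.Str.lower text
    let lens : PySem.Set Int := PySem.Set.ofList (terms.flatMap (fun lt => lt.2.map PySem.Str.len))
    let subs : PySem.Set String := PySem.Set.ofList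
      (lens.flatMap (fun l =>
        (PySem.List.pyRange 0 (PySem.Str.len low - l + 1) 1).map
          (fun i => PySem.Str.slice low (some i) (some (i + l)))))
    terms.flatMap (fun lt =>
      (lt.2.filter (fun s => PySem.Set.contains subs s)).map (fun s => (lt.1, s)))

-- ===== PRECONDITION & SPEC =====
def Spec_find_cognate (text : String) (terms : List (String × List String)) (out : List (String × String)) : Prop := out = find_cognate_alt text terms
instance (text : String) (terms : List (String × List String)) (out : List (String × String)) : Decidable (Spec_find_cognate text terms out) := by unfold Spec_find_cognate; infer_instance

-- ===== CLAIM (what is proved, stated in full; the proofs are below) =====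
def Claim_equal_find_cognate : Prop := ∀ (text : String) (terms : List (String × List String)), Dom_find_cognate text terms → Spec_find_cognate text terms (find_cognate text terms)

-- ===== LEMMAS AND PROOFS =====

-- a slice of the lowered text taken by B is an infix of it
lemma slice_isInfix (low : String) (i l : Int) (hi : 0 ≤ i) (hl : 0 ≤ l) :
    (PySem.Str.slice low (some i) (some (i + l))).toList <:+: low.toList := by
  rw [PySem.Str.toList_slice, PySem.Chars.slice_eq_listSlice,
    PySem.List.slice_toNat _ hi (by omega)]
  exact ((low.toList.drop i.toNat).take_prefix _).isInfix.trans
    (low.toList.drop_suffix i.toNat).isInfix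

-- B's membership test in the substring set agrees with A's substring search,
-- for any stem whose length is among the collected lengths
lemma contains_subs_iff (low : String) (lensList : List Int) (s : String)
    (hmem : PySem.Str.len s ∈ lensList)
    (hnn : ∀ l ∈ lensList, 0 ≤ l) :
    PySem.Set.contains
      (PySem.Set.ofList
        ((PySem.Set.ofList lensList).flatMap (fun l =>
          (PySem.List.pyRange 0 (PySem.Str.len low - l + 1) 1).map
            (fun i => PySem.Str.slice low (some i) (some (i + l)))))) s
      = PySem.Str.isIn s low := by
  rw [Bool.eq_iff_iff, PySem.Str.isIn_eq, PySem.Chars.isIn_iff_infix]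
  rw [PySem.Set.contains_iff, PySem.Set.mem_ofList, List.mem_flatMap]
  constructor
  · rintro ⟨l, hl, hs⟩
    rw [List.mem_map] at hs
    obtain ⟨i, hi, rfl⟩ := hs
    rw [PySem.List.mem_pyRange_one] at hi
    exact slice_isInfix low i l hi.1 (hnn l ((PySem.Set.mem_ofList _ _).mp hl))
  · rintro ⟨p, q, hpq⟩
    refine ⟨PySem.Str.len s, (PySem.Set.mem_ofList _ _).mpr hmem, ?_⟩
    rw [List.mem_map]
    refine ⟨(p.length : Int), ?_, ?_⟩
    · rw [PySem.List.mem_pyRange_one]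
      have hlen : p.length + s.toList.length ≤ low.toList.length := by
        rw [← hpq]; simp
      constructor
      · exact_mod_cast Nat.zero_le _
      · rw [PySem.Str.len_eq, PySem.Str.len_eq]; omega
    · apply String.toList_inj.mp
      rw [PySem.Str.toList_slice, PySem.Chars.slice_eq_listSlice, PySem.Str.len_eq,
        PySem.List.slice_natCast_add]
      rw [← hpq, List.append_assoc, List.drop_left, List.take_left]

-- every collected length is the length of some stem, hence nonnegative
lemma lens_nonneg (terms : List (String × List String)) :
    ∀ l ∈ terms.flatMap (fun lt => lt.2.map PySem.Str.len), 0 ≤ l := by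
  intro l hl
  rw [List.mem_flatMap] at hl
  obtain ⟨lt, _, hl⟩ := hl
  rw [List.mem_map] at hl
  obtain ⟨s, _, rfl⟩ := hl
  rw [PySem.Str.len_eq]
  exact_mod_cast Nat.zero_le _

-- A's nested loops produce, per term, the filtered stems mapped to pairs, concatenated
lemma a_loop (low : String) (terms : List (String × List String)) :
    terms.foldl (fun hits lt =>
        lt.2.foldl (fun hits s =>
          if PySem.Str.isIn s low then hits ++ [(lt.1, s)] else hits) hits) []
      = terms.flatMap (fun lt =>
          (lt.2.filter (fun s => PySem.Str.isIn s low)).map (fun s => (lt.1, s))) := by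
  rw [PySem.List.foldl_congr_mem _ _
    (fun hits lt => hits ++ (lt.2.filter (fun s => PySem.Str.isIn s low)).map (fun s => (lt.1, s))) _
    (by intro acc lt _; exact PySem.List.foldl_append_if _ _ lt.2 acc)]
  rw [PySem.List.foldl_append_eq_flatMap, List.nil_append]

-- ===== VERDICT (by name: the statement is the Claim_ definition above) =====
theorem find_cognate_spec : Claim_equal_find_cognate := by
  intro text terms _
  unfold Spec_find_cognate find_cognate find_cognate_alt
  by_cases htext : text = ""
  · simp [htext]
  · simp only [if_neg htext]
    rw [a_loop]
    -- B's comprehension is the same concatenation with the set-membership test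
    refine List.flatMap_congr (fun lt hlt => ?_)
    congr 1
    refine List.filter_congr (fun s hs => ?_)
    refine (contains_subs_iff _ _ s ?_ (lens_nonneg terms)).symm
    rw [List.mem_flatMap]
    exact ⟨lt, hlt, List.mem_map.mpr ⟨s, hs, rfl⟩⟩
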